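-- pv_equiv track=rewrite | github.com/RegulumDreik/pwr0_warships | main.py | calculate_ship_coords
-- ===== SOURCE A (Python) =====
-- def calculate_shadow(n):  # вычисляем вектор корабля, чтобы центр был нулем
--     min = list(range(0, -1 * n // 2, -1))
--     max = list(range(1, n // 2 + 1))
--     min.sort()
--     return tuple(min + max)
--
-- def shift_over_size(t: list[tuple[int, int]], field_size, direction: bool):
--     q = any(map(lambda b: any(map(lambda i: i>=field_size, b)), t))  # проверка не вылазит ли тень за максимальный размер поля
--     while q:  # сдвигаем в сторону центра, пока не будет влазить
--         m = []
--         for a in t: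
--             if direction:
--                 m.append((a[0]-1, a[1]))  # сдвиг по горизонтали
--             else:
--                 m.append((a[0], a[1]-1))  # сдвиг по вертикали
--         t = m
--         q = any(map(lambda b: any(map(lambda i: i>=field_size, b)), t))  # перепроверяем
--     q = any(map(lambda b: any(map(lambda i: i<0, b)), t))  # проверка не вылазит ли тень за ноль
--     while q:
--         m = []
--         for a in t:
--             if direction:
--                 m.append((a[0]+1, a[1]))  # сдвиг по горизонтали от нуля
--             else:
--                 m.append((a[0], a[1]+1))  # сдвиг по вертикали от нуля
--         t = m
--         q = any(map(lambda b: any(map(lambda i: i<0, b)), t))  # перепроверяем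
--     return t  # возвращаем исправленную тень
--
-- def calculate_ship_coords(  # функция выдает координаты тени для отрисовки корабля
--         size: int,
--         center: tuple[int, int],
--         direction: bool,
--         field_size,
-- ):
--     ship_vector = calculate_shadow(size)  # получаем вектор тени
--     retval = []
--     for shadow_part in ship_vector:
--         if direction:
--             retval.append((center[0] + shadow_part, center[1]))  # размещаем тень горизонтально
--         else:
--             retval.append((center[0], center[1] + shadow_part))  # вертикально
--     retval = shift_over_size(retval, field_size, direction)  # сдвигаем, чтоб не вылазила за край
--     return retval
-- ===== SOURCE B (Python) =====
-- def calculate_ship_coords(size, center, direction, field_size):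
--     if size <= 0:
--         return []
--     lo = -((size - 1) // 2)
--     hi = size // 2
--     c = center[0] if direction else center[1]
--     # shift down once by the overshoot, then clamp at zero
--     start = c + lo - max(0, c + hi - (field_size - 1))
--     start = max(start, 0)
--     if direction:
--         return [(start + k, center[1]) for k in range(size)]
--     else:
--         return [(center[0], start + k) for k in range(size)]
-- ===== Notes on version B (the rewrite author's own statement) =====
-- stated objective: faster
-- what changed: Replaces the two iterative shift-until-inside while loops (each re-scanning all size cells per one-cell shift) by a closed-form shift offset computed once from the segment's endpoints; intended as faster (a timing run saw B well ahead at the largest size both finished, but could not confirm a ratio since A also times out on diverging inputs).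
import Mathlib
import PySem

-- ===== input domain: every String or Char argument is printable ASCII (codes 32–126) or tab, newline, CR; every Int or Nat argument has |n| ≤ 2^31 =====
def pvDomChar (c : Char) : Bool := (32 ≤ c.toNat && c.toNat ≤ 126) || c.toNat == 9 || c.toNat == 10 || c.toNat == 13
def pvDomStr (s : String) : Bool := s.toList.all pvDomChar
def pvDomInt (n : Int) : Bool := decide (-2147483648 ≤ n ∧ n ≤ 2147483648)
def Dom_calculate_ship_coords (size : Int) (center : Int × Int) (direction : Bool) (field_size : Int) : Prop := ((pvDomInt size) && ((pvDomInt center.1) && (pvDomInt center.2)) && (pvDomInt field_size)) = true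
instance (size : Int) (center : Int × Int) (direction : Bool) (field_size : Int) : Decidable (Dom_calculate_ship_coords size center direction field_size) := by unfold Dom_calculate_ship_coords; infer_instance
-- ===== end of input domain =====

-- B replaces A's one-cell-at-a-time shift loops by a closed-form shift offset applied once (intended as faster; a timing run could not confirm a ratio: A diverges/times out on many generated inputs).

-- ===== PORT A =====
def calculate_shadow (n : Int) : List Int :=
  PySem.List.sorted (PySem.List.pyRange 0 (PySem.Int.floordiv (-1 * n) 2) (-1)) (fun x => x) false
    ++ PySem.List.pyRange 1 (PySem.Int.floordiv n 2 + 1) 1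

-- A's first while loop (shift towards the centre while some coordinate ≥ field_size);
-- fuel-bounded: on every input admitted by Pre_ the loop terminates well within pvFuel steps
def pvShiftDown (fuel : Nat) (t : List (Int × Int)) (field_size : Int) (direction : Bool) : List (Int × Int) :=
  match fuel with
  | 0 => t
  | f + 1 =>
    if t.any (fun b => decide (field_size ≤ b.1) || decide (field_size ≤ b.2)) then
      pvShiftDown f (t.map (fun a => if direction then (a.1 - 1, a.2) else (a.1, a.2 - 1))) field_size direction
    else t

-- A's second while loop (shift away from zero while some coordinate < 0)
def pvShiftUp (fuel : Nat) (t : List (Int × Int)) (direction : Bool) : List (Int × Int) :=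
  match fuel with
  | 0 => t
  | f + 1 =>
    if t.any (fun b => decide (b.1 < 0) || decide (b.2 < 0)) then
      pvShiftUp f (t.map (fun a => if direction then (a.1 + 1, a.2) else (a.1, a.2 + 1))) direction
    else t

def pvFuel : Nat := 1099511627776  -- 2^40, ample for the ≤ 2^31-bounded inputs of Dom_

def shift_over_size (t : List (Int × Int)) (field_size : Int) (direction : Bool) : List (Int × Int) :=
  pvShiftUp pvFuel (pvShiftDown pvFuel t field_size direction) direction

def calculate_ship_coords (size : Int) (center : Int × Int) (direction : Bool) (field_size : Int) : List (Int × Int) :=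
  let ship_vector := calculate_shadow size
  let retval := ship_vector.map (fun sp =>
    if direction then (center.1 + sp, center.2) else (center.1, center.2 + sp))
  shift_over_size retval field_size direction

-- ===== PORT B =====
def calculate_ship_coords_alt (size : Int) (center : Int × Int) (direction : Bool) (field_size : Int) : List (Int × Int) :=
  if size ≤ 0 then []
  else
    let start := max ((if direction then center.1 else center.2) + -(PySem.Int.floordiv (size - 1) 2)
      - max 0 ((if direction then center.1 else center.2) + PySem.Int.floordiv size 2 - (field_size - 1))) 0
    if direction then
      (PySem.List.pyRange 0 size 1).map (fun k => (start + k, center.2))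
    else
      (PySem.List.pyRange 0 size 1).map (fun k => (center.1, start + k))

-- ===== PRECONDITION & SPEC =====
-- Pre_ excludes exactly the inputs on which A never returns: with a nonempty shadow (size > 0),
-- A's while loops shift only along the ship's axis, so if the fixed off-axis coordinate of the
-- centre lies outside [0, field_size) the loop condition can never become false and A diverges.
def Pre_calculate_ship_coords (size : Int) (center : Int × Int) (direction : Bool) (field_size : Int) : Prop :=
  size ≤ 0 ∨ (0 ≤ (if direction then center.2 else center.1) ∧ (if direction then center.2 else center.1) < field_size)
instance (size : Int) (center : Int × Int) (direction : Bool) (field_size : Int) : Decidable (Pre_calculate_ship_coords size center direction field_size) := by unfold Pre_calculate_ship_coords; infer_instance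

def pvWitness_calculate_ship_coords : Int × (Int × Int) × Bool × Int := (3, (1, 1), true, 5)

def Spec_calculate_ship_coords (size : Int) (center : Int × Int) (direction : Bool) (field_size : Int) (out : List (Int × Int)) : Prop := out = calculate_ship_coords_alt size center direction field_size
instance (size : Int) (center : Int × Int) (direction : Bool) (field_size : Int) (out : List (Int × Int)) : Decidable (Spec_calculate_ship_coords size center direction field_size out) := by unfold Spec_calculate_ship_coords; infer_instance

-- ===== CLAIM (what is proved, stated in full; the proofs are below) =====
def Claim_equal_calculate_ship_coords : Prop := ∀ (size : Int) (center : Int × Int) (direction : Bool) (field_size : Int), Dom_calculate_ship_coords size center direction field_size → Pre_calculate_ship_coords size center direction field_size → Spec_calculate_ship_coords size center direction field_size (calculate_ship_coords size center direction field_size)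

-- ===== LEMMAS AND PROOFS =====

-- the coordinate segment [a, b) laid along the ship's axis, off-axis coordinate o
def pvSeg (dir : Bool) (o a b : Int) : List (Int × Int) :=
  (PySem.List.pyRange a b 1).map (fun x => if dir then (x, o) else (o, x))

lemma pv_map_add_pyRange {α : Type} (g : Int → α) (c a b : Int) :
    (PySem.List.pyRange a b 1).map (fun x => g (c + x)) = (PySem.List.pyRange (c + a) (c + b) 1).map g := by
  simp only [PySem.List.pyRange_one, List.map_map]
  have h : ((c + b) - (c + a)).toNat = (b - a).toNat := by omega
  rw [h]
  apply List.map_congr_left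
  intro k _
  dsimp only [Function.comp]
  congr 1
  ring

lemma pvShadow_pos (n : Int) (h : 0 < n) :
    calculate_shadow n = PySem.List.pyRange ((-n) / 2 + 1) (n / 2 + 1) 1 := by
  unfold calculate_shadow
  rw [PySem.Int.floordiv_eq_ediv_of_pos (by norm_num), PySem.Int.floordiv_eq_ediv_of_pos (by norm_num)]
  have hm : (-1 * n) / 2 = (-n) / 2 := by ring_nf
  rw [hm]
  have hlt : (-n) / 2 < 0 := by omega
  rw [PySem.List.pyRange_neg_one_eq_reverse]
  have hsort : PySem.List.sorted (PySem.List.pyRange ((-n) / 2 + 1) (0 + 1) 1).reverse (fun x => x) false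
      = PySem.List.pyRange ((-n) / 2 + 1) (0 + 1) 1 := by
    apply PySem.List.sorted_eq_of_perm_of_pairwise_lt
    · exact (List.reverse_perm _).symm
    · exact PySem.List.pairwise_lt_pyRange_one _ _
  rw [hsort]
  rw [show (0 : Int) + 1 = 1 from by norm_num]
  rw [← PySem.List.pyRange_one_append ((-n) / 2 + 1) 1 (n / 2 + 1) (by omega) (by omega)]

lemma pvShadow_nonpos (n : Int) (h : n ≤ 0) : calculate_shadow n = [] := by
  unfold calculate_shadow
  rw [PySem.Int.floordiv_eq_ediv_of_pos (by norm_num), PySem.Int.floordiv_eq_ediv_of_pos (by norm_num)]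
  have hm : (-1 * n) / 2 = (-n) / 2 := by ring_nf
  rw [hm]
  rw [PySem.List.pyRange_neg_one_eq_nil (by omega), PySem.List.pyRange_one_eq_nil (by omega)]
  rfl

lemma pvSeg_shift (dir : Bool) (o a b d : Int) :
    (pvSeg dir o a b).map (fun p => if dir then (p.1 + d, p.2) else (p.1, p.2 + d))
      = pvSeg dir o (a + d) (b + d) := by
  unfold pvSeg
  simp only [PySem.List.pyRange_one, List.map_map]
  have h : ((b + d) - (a + d)).toNat = (b - a).toNat := by omega
  rw [h]
  apply List.map_congr_left
  intro k _
  cases dir <;> simp [Function.comp] <;> ring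

lemma pvSeg_any_ge (dir : Bool) (o a b fs : Int) (hab : a < b) (ho : o < fs) :
    (pvSeg dir o a b).any (fun p => decide (fs ≤ p.1) || decide (fs ≤ p.2)) = decide (fs ≤ b - 1) := by
  unfold pvSeg
  rcases Decidable.em (fs ≤ b - 1) with h | h
  · simp only [h, decide_true]
    rw [List.any_eq_true]
    refine ⟨if dir then (b - 1, o) else (o, b - 1), ?_, ?_⟩
    · apply List.mem_map_of_mem
      rw [PySem.List.mem_pyRange_one]
      omega
    · cases dir <;> simp <;> omega
  · simp only [h, decide_false]
    rw [List.any_eq_false]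
    intro p hp
    rw [List.mem_map] at hp
    obtain ⟨x, hx, rfl⟩ := hp
    rw [PySem.List.mem_pyRange_one] at hx
    cases dir <;> simp <;> omega

lemma pvSeg_any_lt (dir : Bool) (o a b : Int) (hab : a < b) (ho : 0 ≤ o) :
    (pvSeg dir o a b).any (fun p => decide (p.1 < 0) || decide (p.2 < 0)) = decide (a < 0) := by
  unfold pvSeg
  rcases Decidable.em (a < 0) with h | h
  · simp only [h, decide_true]
    rw [List.any_eq_true]
    refine ⟨if dir then (a, o) else (o, a), ?_, ?_⟩
    · apply List.mem_map_of_mem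
      rw [PySem.List.mem_pyRange_one]
      omega
    · cases dir <;> simp <;> omega
  · simp only [h, decide_false]
    rw [List.any_eq_false]
    intro p hp
    rw [List.mem_map] at hp
    obtain ⟨x, hx, rfl⟩ := hp
    rw [PySem.List.mem_pyRange_one] at hx
    cases dir <;> simp <;> omega

lemma pvShiftDown_seg (dir : Bool) (o fs : Int) (ho : o < fs) :
    ∀ (fuel : Nat) (a b : Int), a < b → b - fs ≤ (fuel : Int) →
      pvShiftDown fuel (pvSeg dir o a b) fs dir
        = pvSeg dir o (a - max 0 (b - fs)) (b - max 0 (b - fs)) := by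
  intro fuel
  induction fuel with
  | zero =>
    intro a b hab hfuel
    have : max 0 (b - fs) = 0 := by omega
    rw [this]
    simp [pvShiftDown]
  | succ f ih =>
    intro a b hab hfuel
    unfold pvShiftDown
    rw [pvSeg_any_ge dir o a b fs hab ho]
    rcases Decidable.em (fs ≤ b - 1) with h | h
    · simp only [h, decide_true, if_true]
      have hmap : (pvSeg dir o a b).map (fun p => if dir then (p.1 - 1, p.2) else (p.1, p.2 - 1))
          = pvSeg dir o (a - 1) (b - 1) := by
        have := pvSeg_shift dir o a b (-1)
        simpa [sub_eq_add_neg] using this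
      rw [hmap, ih (a - 1) (b - 1) (by omega) (by omega)]
      have h1 : a - 1 - max 0 (b - 1 - fs) = a - max 0 (b - fs) := by omega
      have h2 : b - 1 - max 0 (b - 1 - fs) = b - max 0 (b - fs) := by omega
      rw [h1, h2]
    · simp only [h, decide_false]
      have : max 0 (b - fs) = 0 := by omega
      rw [this]
      norm_num

lemma pvShiftUp_seg (dir : Bool) (o : Int) (ho : 0 ≤ o) :
    ∀ (fuel : Nat) (a b : Int), a < b → -a ≤ (fuel : Int) →
      pvShiftUp fuel (pvSeg dir o a b) dir
        = pvSeg dir o (a + max 0 (-a)) (b + max 0 (-a)) := by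
  intro fuel
  induction fuel with
  | zero =>
    intro a b hab hfuel
    have : max 0 (-a) = 0 := by omega
    rw [this]
    simp [pvShiftUp]
  | succ f ih =>
    intro a b hab hfuel
    unfold pvShiftUp
    rw [pvSeg_any_lt dir o a b hab ho]
    rcases Decidable.em (a < 0) with h | h
    · simp only [h, decide_true, if_true]
      have hmap : (pvSeg dir o a b).map (fun p => if dir then (p.1 + 1, p.2) else (p.1, p.2 + 1))
          = pvSeg dir o (a + 1) (b + 1) := pvSeg_shift dir o a b 1
      rw [hmap, ih (a + 1) (b + 1) (by omega) (by omega)]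
      have h1 : a + 1 + max 0 (-(a + 1)) = a + max 0 (-a) := by omega
      have h2 : b + 1 + max 0 (-(a + 1)) = b + max 0 (-a) := by omega
      rw [h1, h2]
    · simp only [h, decide_false]
      have : max 0 (-a) = 0 := by omega
      rw [this]
      norm_num

lemma pvShiftDown_nil (fuel : Nat) (fs : Int) (dir : Bool) : pvShiftDown fuel [] fs dir = [] := by
  cases fuel <;> simp [pvShiftDown]

lemma pvShiftUp_nil (fuel : Nat) (dir : Bool) : pvShiftUp fuel [] dir = [] := by
  cases fuel <;> simp [pvShiftUp]

lemma pv_main_seg (dir : Bool) (c o fs n : Int) (hn : 0 < n)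
    (ho1 : 0 ≤ o) (ho2 : o < fs)
    (hc1 : -2147483648 ≤ c) (hc2 : c ≤ 2147483648) (hnb : n ≤ 2147483648)
    (hfs1 : -2147483648 ≤ fs) (hfs2 : fs ≤ 2147483648) :
    pvShiftUp pvFuel (pvShiftDown pvFuel (pvSeg dir o (c + ((-n) / 2 + 1)) (c + (n / 2 + 1))) fs dir) dir
      = pvSeg dir o (max (c + ((-n) / 2 + 1) - max 0 (c + (n / 2 + 1) - fs)) 0)
                    (max (c + ((-n) / 2 + 1) - max 0 (c + (n / 2 + 1) - fs)) 0 + n) := by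
  set a := c + ((-n) / 2 + 1) with ha
  set b := c + (n / 2 + 1) with hb
  have hab : a < b := by omega
  have hfuel : (pvFuel : Int) = 1099511627776 := by norm_num [pvFuel]
  rw [pvShiftDown_seg dir o fs ho2 pvFuel a b hab (by rw [hfuel]; omega)]
  rw [pvShiftUp_seg dir o ho1 pvFuel _ _ (by omega) (by rw [hfuel]; omega)]
  congr 1 <;> omega

-- ===== VERDICT (by name: the statement is the Claim_ definition above) =====
theorem calculate_ship_coords_spec : Claim_equal_calculate_ship_coords := by
  intro size center direction field_size hDom hPre
  unfold Spec_calculate_ship_coords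
  have hD : -2147483648 ≤ size ∧ size ≤ 2147483648 ∧
      -2147483648 ≤ center.1 ∧ center.1 ≤ 2147483648 ∧
      -2147483648 ≤ center.2 ∧ center.2 ≤ 2147483648 ∧
      -2147483648 ≤ field_size ∧ field_size ≤ 2147483648 := by
    unfold Dom_calculate_ship_coords pvDomInt at hDom
    simp at hDom
    omega
  rcases Decidable.em (size ≤ 0) with hsz | hsz
  · -- empty shadow: both return []
    unfold calculate_ship_coords shift_over_size calculate_ship_coords_alt
    rw [pvShadow_nonpos size hsz]
    simp [pvShiftDown_nil, pvShiftUp_nil, hsz]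
  · have hpos : 0 < size := by omega
    have hoPre : 0 ≤ (if direction then center.2 else center.1) ∧
        (if direction then center.2 else center.1) < field_size := by
      unfold Pre_calculate_ship_coords at hPre
      rcases hPre with h | h
      · omega
      · exact h
    unfold calculate_ship_coords shift_over_size calculate_ship_coords_alt
    rw [pvShadow_pos size hpos]
    rw [if_neg hsz]
    rw [PySem.Int.floordiv_eq_ediv_of_pos (by norm_num), PySem.Int.floordiv_eq_ediv_of_pos (by norm_num)]
    cases direction with
    | true =>
      simp only [if_true] at hoPre ⊢
      rw [pv_map_add_pyRange (g := fun x => (x, center.2)) center.1 ((-size) / 2 + 1) (size / 2 + 1)]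
      rw [show ((PySem.List.pyRange (center.1 + ((-size) / 2 + 1)) (center.1 + (size / 2 + 1)) 1).map
            (fun x => (x, center.2))) = pvSeg true center.2 (center.1 + ((-size) / 2 + 1)) (center.1 + (size / 2 + 1)) from by
          unfold pvSeg; simp]
      rw [pv_main_seg true center.1 center.2 field_size size hpos hoPre.1 hoPre.2
            (by omega) (by omega) (by omega) (by omega) (by omega)]
      rw [pv_map_add_pyRange (g := fun x => (x, center.2))
            (max (center.1 + -((size - 1) / 2) - max 0 (center.1 + size / 2 - (field_size - 1))) 0) 0 size]
      unfold pvSeg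
      simp only [if_true]
      congr 2 <;> omega
    | false =>
      simp only [Bool.false_eq_true, if_false] at hoPre ⊢
      rw [pv_map_add_pyRange (g := fun x => (center.1, x)) center.2 ((-size) / 2 + 1) (size / 2 + 1)]
      rw [show ((PySem.List.pyRange (center.2 + ((-size) / 2 + 1)) (center.2 + (size / 2 + 1)) 1).map
            (fun x => (center.1, x))) = pvSeg false center.1 (center.2 + ((-size) / 2 + 1)) (center.2 + (size / 2 + 1)) from by
          unfold pvSeg; simp]
      rw [pv_main_seg false center.2 center.1 field_size size hpos hoPre.1 hoPre.2
            (by omega) (by omega) (by omega) (by omega) (by omega)]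
      rw [pv_map_add_pyRange (g := fun x => (center.1, x))
            (max (center.2 + -((size - 1) / 2) - max 0 (center.2 + size / 2 - (field_size - 1))) 0) 0 size]
      unfold pvSeg
      simp only [Bool.false_eq_true, if_false]
      congr 2 <;> omega
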